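-- pv_equiv track=rewrite | github.com/degefe55/trading-assistant | core/method_option.py | _index_of_extreme
-- ===== SOURCE A (Python) =====
-- def _safe_num(v):
--     """Coerce to float if numeric, else None. Bool is rejected because
--     bool is an int subclass and would silently coerce to 0.0/1.0."""
--     if isinstance(v, bool):
--         return None
--     if isinstance(v, (int, float)):
--         return float(v)
--     return None
--
-- def _index_of_extreme(bars: list, last_n: int, key: str,
--                       mode: str):
--     """Index (in the *full* bars list) of the bar with the min/max
--     `key` value within the last `last_n` bars. None if nothing
--     numeric is found."""
--     if not bars or last_n <= 0:
--         return None
--     chunk = bars[-last_n:] if len(bars) >= last_n else bars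
--     base = len(bars) - len(chunk)
--     best_idx = None
--     best_val = None
--     for j, b in enumerate(chunk):
--         if not isinstance(b, dict):
--             continue
--         v = _safe_num(b.get(key))
--         if v is None:
--             continue
--         if best_val is None:
--             best_val = v
--             best_idx = j
--             continue
--         if mode == "min" and v < best_val:
--             best_val = v
--             best_idx = j
--         elif mode == "max" and v > best_val:
--             best_val = v
--             best_idx = j
--     return None if best_idx is None else base + best_idx
-- ===== SOURCE B (Python) =====
-- def _safe_num(v):
--     if isinstance(v, bool):
--         return None
--     if isinstance(v, (int, float)):
--         return float(v)
--     return None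
--
-- def _index_of_extreme(bars: list, last_n: int, key: str, mode: str):
--     """Two-stage 'what, then where': stage 1 computes only the target VALUE
--     (min/max of the window's numeric values, or the first one); stage 2 is a
--     separate search for the first window index whose value equals it. No
--     (index, value) pair is ever tracked; first-occurrence search reproduces
--     the strict-comparison tie-breaking."""
--     if not bars or last_n <= 0:
--         return None
--     chunk = bars[-last_n:] if len(bars) >= last_n else bars
--     base = len(bars) - len(chunk)
--     vals = [v for b in chunk
--             if isinstance(b, dict) and (v := _safe_num(b.get(key))) is not None]
--     if not vals:
--         return None
--     target = min(vals) if mode == "min" else max(vals) if mode == "max" else vals[0]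
--     for j, b in enumerate(chunk):
--         if isinstance(b, dict) and _safe_num(b.get(key)) == target:
--             return base + j
-- ===== Notes on version B (the rewrite author's own statement) =====
-- stated objective: alternative
-- what changed: Replaces A's single online scan tracking an (index, value) best pair by a two-stage algorithm: stage 1 reduces the window's numeric values alone to the target value (min/max or the first), stage 2 independently searches for the first index whose value equals that target.
import Mathlib
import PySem

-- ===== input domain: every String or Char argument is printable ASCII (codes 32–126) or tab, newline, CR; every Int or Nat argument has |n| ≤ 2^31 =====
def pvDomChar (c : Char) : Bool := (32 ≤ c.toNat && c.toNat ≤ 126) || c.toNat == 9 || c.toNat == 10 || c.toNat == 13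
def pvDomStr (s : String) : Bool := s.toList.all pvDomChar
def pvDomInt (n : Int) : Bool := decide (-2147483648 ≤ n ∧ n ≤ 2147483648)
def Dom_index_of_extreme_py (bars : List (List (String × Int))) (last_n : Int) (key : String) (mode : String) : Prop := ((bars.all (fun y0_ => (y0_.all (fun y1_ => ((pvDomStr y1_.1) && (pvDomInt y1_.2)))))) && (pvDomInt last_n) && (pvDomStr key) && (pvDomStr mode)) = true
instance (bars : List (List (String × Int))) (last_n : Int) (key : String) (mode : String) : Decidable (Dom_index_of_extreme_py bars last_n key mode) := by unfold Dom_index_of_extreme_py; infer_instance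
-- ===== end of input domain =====

-- B replaces A's online (index,value) best-pair scan by a two-stage algorithm:
-- reduce the window's numeric values alone to the target value, then search
-- for the first index attaining it ('what, then where'): alternative decomposition.


-- ===== PORT A =====
-- _safe_num: on this typed domain the value is always an int (never a bool and
-- never a non-number), and float(v) of an int compares like the int, so this is
-- the identity on Option Int; exact here.
def safe_num_py (v : Option Int) : Option Int :=
  match v with
  | none => none
  | some n => some n

-- loop body of A: state = (best_idx, best_val); the isinstance(b, dict) test is
-- always true on this typed domain.
def stepA_py (key mode : String) (st : Option Int × Option Int)
    (jb : Int × List (String × Int)) : Option Int × Option Int :=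
  match safe_num_py (PySem.Dict.get? ⟨jb.2⟩ key) with
  | none => st
  | some v =>
    match st with
    | (_, none) => (some jb.1, some v)
    | (bi?, some bv) =>
      if mode == "min" && decide (v < bv) then (some jb.1, some v)
      else if mode == "max" && decide (v > bv) then (some jb.1, some v)
      else (bi?, some bv)

def index_of_extreme_py (bars : List (List (String × Int))) (last_n : Int) (key : String) (mode : String) : Option Int :=
  if bars.isEmpty = true ∨ last_n ≤ 0 then none
  else
    let chunk := if (bars.length : Int) ≥ last_n then PySem.List.slice bars (some (-last_n)) none else bars
    let base : Int := (bars.length : Int) - (chunk.length : Int)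
    let r := List.foldl (stepA_py key mode) (none, none) (PySem.List.enumerate chunk 0)
    match r.1 with
    | none => none
    | some bi => some (base + bi)

-- ===== PORT B =====
-- stage 2 of B: the `for j, b in enumerate(chunk): if … == target: return base + j` loop
def locate_py (key : String) (base target : Int) : List (Int × List (String × Int)) → Option Int
  | [] => none
  | jb :: rest =>
    if safe_num_py (PySem.Dict.get? ⟨jb.2⟩ key) == some target then some (base + jb.1)
    else locate_py key base target rest

def index_of_extreme_py_alt (bars : List (List (String × Int))) (last_n : Int) (key : String) (mode : String) : Option Int :=
  if bars.isEmpty = true ∨ last_n ≤ 0 then none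
  else
    let chunk := if (bars.length : Int) ≥ last_n then PySem.List.slice bars (some (-last_n)) none else bars
    let base : Int := (bars.length : Int) - (chunk.length : Int)
    let vals := chunk.filterMap (fun b => safe_num_py (PySem.Dict.get? ⟨b⟩ key))
    match vals with
    | [] => none
    | v0 :: vs =>
      let target := if mode == "min" then (PySem.List.min? (v0 :: vs) (fun v => v)).getD v0
                    else if mode == "max" then (PySem.List.max? (v0 :: vs) (fun v => v)).getD v0
                    else v0
      locate_py key base target (PySem.List.enumerate chunk 0)

-- ===== PRECONDITION & SPEC =====
def Spec_index_of_extreme_py (bars : List (List (String × Int))) (last_n : Int) (key : String) (mode : String) (out : Option Int) : Prop := out = index_of_extreme_py_alt bars last_n key mode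
instance (bars : List (List (String × Int))) (last_n : Int) (key : String) (mode : String) (out : Option Int) : Decidable (Spec_index_of_extreme_py bars last_n key mode out) := by unfold Spec_index_of_extreme_py; infer_instance

-- ===== CLAIM (what is proved, stated in full; the proofs are below) =====
def Claim_equal_index_of_extreme_py : Prop := ∀ (bars : List (List (String × Int))) (last_n : Int) (key : String) (mode : String), Dom_index_of_extreme_py bars last_n key mode → Spec_index_of_extreme_py bars last_n key mode (index_of_extreme_py bars last_n key mode)

-- ===== LEMMAS AND PROOFS =====

-- a chunk element's candidate: (index, value) if the bar has a numeric value at `key`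
def fCand (key : String) (jb : Int × List (String × Int)) : Option (Int × Int) :=
  (safe_num_py (PySem.Dict.get? ⟨jb.2⟩ key)).map (fun v => (jb.1, v))

-- A's loop body restricted to candidate elements
def candStep (mode : String) (st : Option Int × Option Int) (p : Int × Int) :
    Option Int × Option Int :=
  match st with
  | (_, none) => (some p.1, some p.2)
  | (bi?, some bv) =>
    if mode == "min" && decide (p.2 < bv) then (some p.1, some p.2)
    else if mode == "max" && decide (p.2 > bv) then (some p.1, some p.2)
    else (bi?, some bv)

def o2s : Option (Int × Int) → Option Int × Option Int
  | none => (none, none)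
  | some p => (some p.1, some p.2)

def minStrict (p x : Int × Int) : Int × Int := if x.2 < p.2 then x else p
def maxStrict (p x : Int × Int) : Int × Int := if p.2 < x.2 then x else p

def findEq (t : Int) : List (Int × Int) → Option (Int × Int)
  | [] => none
  | x :: r => if x.2 = t then some x else findEq t r

theorem foldA_eq_foldCand (key mode : String) (l : List (Int × List (String × Int)))
    (st : Option Int × Option Int) :
    List.foldl (stepA_py key mode) st l
      = List.foldl (candStep mode) st (l.filterMap (fCand key)) := by
  induction l generalizing st with
  | nil => rfl
  | cons jb t ih =>
    cases hv : safe_num_py (PySem.Dict.get? ⟨jb.2⟩ key) with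
    | none =>
      have hf : fCand key jb = none := by simp [fCand, hv]
      have hs : stepA_py key mode st jb = st := by simp [stepA_py, hv]
      rw [List.foldl_cons, hs, List.filterMap_cons, hf]
      exact ih st
    | some v =>
      have hf : fCand key jb = some (jb.1, v) := by simp [fCand, hv]
      have hs : stepA_py key mode st jb = candStep mode st (jb.1, v) := by
        simp only [stepA_py, hv]
        obtain ⟨a, b⟩ := st
        cases b <;> rfl
      rw [List.foldl_cons, hs, List.filterMap_cons, hf, List.foldl_cons]
      exact ih _

-- the values of the candidate list are exactly B's `vals`
theorem cand_vals (key : String) (l : List (List (String × Int))) (i : Int) :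
    ((PySem.List.enumerate l i).filterMap (fCand key)).map (·.2)
      = l.filterMap (fun b => safe_num_py (PySem.Dict.get? ⟨b⟩ key)) := by
  induction l generalizing i with
  | nil => rfl
  | cons b t ih =>
    rw [PySem.List.enumerate_cons, List.filterMap_cons, List.filterMap_cons]
    cases hv : safe_num_py (PySem.Dict.get? ⟨b⟩ key) with
    | none => simpa [fCand, hv] using ih (i + 1)
    | some v => simpa [fCand, hv] using ih (i + 1)

-- B's stage-2 search is the first candidate whose value equals the target
theorem locate_eq_findEq (key : String) (base target : Int)
    (l : List (List (String × Int))) (i : Int) :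
    locate_py key base target (PySem.List.enumerate l i)
      = (findEq target ((PySem.List.enumerate l i).filterMap (fCand key))).map (fun p => base + p.1) := by
  induction l generalizing i with
  | nil => rfl
  | cons b t ih =>
    rw [PySem.List.enumerate_cons, List.filterMap_cons]
    cases hv : safe_num_py (PySem.Dict.get? ⟨b⟩ key) with
    | none =>
      have : fCand key (i, b) = none := by simp [fCand, hv]
      simp only [locate_py, hv, this]
      simpa using ih (i + 1)
    | some v =>
      have hf : fCand key (i, b) = some (i, v) := by simp [fCand, hv]
      by_cases h : v = target
      · simp [locate_py, hv, hf, findEq, h]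
      · simp only [locate_py, hv, hf, findEq]
        have hb : (some v == some target) = false := by simp [h]
        rw [hb]
        simp only [Bool.false_eq_true, if_false, if_neg h]
        simpa using ih (i + 1)

-- A's min-mode scan over candidates is the strict running-min fold
theorem foldCand_min_eq (l : List (Int × Int)) (i bv : Int) :
    List.foldl (candStep "min") (some i, some bv) l
      = o2s (some (List.foldl minStrict (i, bv) l)) := by
  induction l generalizing i bv with
  | nil => rfl
  | cons x r ih =>
    rw [List.foldl_cons, List.foldl_cons]
    by_cases h : x.2 < bv
    · have h1 : candStep "min" (some i, some bv) x = (some x.1, some x.2) := by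
        simp [candStep, h]
      have h2 : minStrict (i, bv) x = x := by simp [minStrict, h]
      rw [h1, h2]; exact ih x.1 x.2
    · have h1 : candStep "min" (some i, some bv) x = (some i, some bv) := by
        simp [candStep, h]
      have h2 : minStrict (i, bv) x = (i, bv) := by simp [minStrict, h]
      rw [h1, h2]; exact ih i bv

theorem foldCand_max_eq (l : List (Int × Int)) (i bv : Int) :
    List.foldl (candStep "max") (some i, some bv) l
      = o2s (some (List.foldl maxStrict (i, bv) l)) := by
  induction l generalizing i bv with
  | nil => rfl
  | cons x r ih =>
    rw [List.foldl_cons, List.foldl_cons]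
    by_cases h : bv < x.2
    · have h1 : candStep "max" (some i, some bv) x = (some x.1, some x.2) := by
        simp [candStep, h]
      have h2 : maxStrict (i, bv) x = x := by simp [maxStrict, h]
      rw [h1, h2]; exact ih x.1 x.2
    · have h1 : candStep "max" (some i, some bv) x = (some i, some bv) := by
        simp [candStep, h]
      have h2 : maxStrict (i, bv) x = (i, bv) := by simp [maxStrict, h]
      rw [h1, h2]; exact ih i bv

theorem foldCand_other_eq (mode : String) (h1 : (mode == "min") = false)
    (h2 : (mode == "max") = false) (l : List (Int × Int)) (i bv : Int) :
    List.foldl (candStep mode) (some i, some bv) l = (some i, some bv) := by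
  induction l with
  | nil => rfl
  | cons x r ih =>
    have : candStep mode (some i, some bv) x = (some i, some bv) := by
      simp [candStep, h1, h2]
    rw [List.foldl_cons, this]; exact ih

-- the first element attaining the running MIN is the strict-update fold's result
theorem findEq_min (l : List (Int × Int)) (p : Int × Int) :
    findEq (List.foldl min p.2 (l.map (·.2))) (p :: l)
      = some (List.foldl minStrict p l) := by
  induction l generalizing p with
  | nil => simp [findEq]
  | cons x r ih =>
    by_cases hx : x.2 < p.2
    · have hmin : min p.2 x.2 = x.2 := min_eq_right hx.le
      have hms : minStrict p x = x := by simp [minStrict, hx]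
      simp only [List.map_cons, List.foldl_cons, hms, hmin]
      have hMle : List.foldl min x.2 (r.map (·.2)) ≤ x.2 :=
        (PySem.List.foldl_min_le (r.map (·.2)) x.2).1
      have hpne : ¬ (p.2 = List.foldl min x.2 (r.map (·.2))) := by
        intro h
        rw [← h] at hMle
        exact absurd (lt_of_lt_of_le hx hMle) (lt_irrefl _)
      rw [show findEq (List.foldl min x.2 (r.map (·.2))) (p :: x :: r)
            = findEq (List.foldl min x.2 (r.map (·.2))) (x :: r) from by
            simp [findEq, hpne]]
      exact ih x
    · have hple : p.2 ≤ x.2 := not_lt.mp hx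
      have hmin : min p.2 x.2 = p.2 := min_eq_left hple
      have hms : minStrict p x = p := by simp [minStrict, hx]
      simp only [List.map_cons, List.foldl_cons, hms, hmin]
      set M := List.foldl min p.2 (r.map (·.2)) with hM
      have hMp : M ≤ p.2 := (PySem.List.foldl_min_le (r.map (·.2)) p.2).1
      have hIH := ih p
      rw [← hM] at hIH
      by_cases hp : p.2 = M
      · simp only [findEq, if_pos hp] at hIH ⊢
        exact hIH
      · have hxM : ¬ (x.2 = M) := by
          intro h
          have hlt : M < p.2 := lt_of_le_of_ne hMp (fun h' => hp h'.symm)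
          rw [← h] at hlt
          exact absurd hple (not_le.mpr hlt)
        simp only [findEq, if_neg hp, if_neg hxM] at hIH ⊢
        exact hIH

theorem findEq_max (l : List (Int × Int)) (p : Int × Int) :
    findEq (List.foldl max p.2 (l.map (·.2))) (p :: l)
      = some (List.foldl maxStrict p l) := by
  induction l generalizing p with
  | nil => simp [findEq]
  | cons x r ih =>
    by_cases hx : p.2 < x.2
    · have hmax : max p.2 x.2 = x.2 := max_eq_right hx.le
      have hms : maxStrict p x = x := by simp [maxStrict, hx]
      simp only [List.map_cons, List.foldl_cons, hms, hmax]
      have hMge : x.2 ≤ List.foldl max x.2 (r.map (·.2)) :=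
        (PySem.List.le_foldl_max (r.map (·.2)) x.2).1
      have hpne : ¬ (p.2 = List.foldl max x.2 (r.map (·.2))) := by
        intro h
        rw [← h] at hMge
        exact absurd (lt_of_lt_of_le hx hMge) (lt_irrefl _)
      rw [show findEq (List.foldl max x.2 (r.map (·.2))) (p :: x :: r)
            = findEq (List.foldl max x.2 (r.map (·.2))) (x :: r) from by
            simp [findEq, hpne]]
      exact ih x
    · have hple : x.2 ≤ p.2 := not_lt.mp hx
      have hmax : max p.2 x.2 = p.2 := max_eq_left hple
      have hms : maxStrict p x = p := by simp [maxStrict, hx]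
      simp only [List.map_cons, List.foldl_cons, hms, hmax]
      set M := List.foldl max p.2 (r.map (·.2)) with hM
      have hMp : p.2 ≤ M := (PySem.List.le_foldl_max (r.map (·.2)) p.2).1
      have hIH := ih p
      rw [← hM] at hIH
      by_cases hp : p.2 = M
      · simp only [findEq, if_pos hp] at hIH ⊢
        exact hIH
      · have hxM : ¬ (x.2 = M) := by
          intro h
          have hlt : p.2 < M := lt_of_le_of_ne hMp hp
          rw [← h] at hlt
          exact absurd hple (not_le.mpr hlt)
        simp only [findEq, if_neg hp, if_neg hxM] at hIH ⊢
        exact hIH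

-- the common core on the candidate list
theorem core_eq (key mode : String) (base : Int) (chunk : List (List (String × Int))) :
    (match (List.foldl (candStep mode) (none, none)
        ((PySem.List.enumerate chunk 0).filterMap (fCand key))).1 with
     | none => none
     | some bi => some (base + bi))
    =
    (match chunk.filterMap (fun b => safe_num_py (PySem.Dict.get? ⟨b⟩ key)) with
     | [] => none
     | v0 :: vs =>
       let target := if mode == "min" then (PySem.List.min? (v0 :: vs) (fun v => v)).getD v0
                     else if mode == "max" then (PySem.List.max? (v0 :: vs) (fun v => v)).getD v0
                     else v0
       locate_py key base target (PySem.List.enumerate chunk 0)) := by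
  set c := (PySem.List.enumerate chunk 0).filterMap (fCand key) with hc
  have hvals : chunk.filterMap (fun b => safe_num_py (PySem.Dict.get? ⟨b⟩ key))
      = c.map (·.2) := (cand_vals key chunk 0).symm
  rw [hvals]
  cases hcc : c with
  | nil => rfl
  | cons c0 ct =>
    have hloc : ∀ t : Int, locate_py key base t (PySem.List.enumerate chunk 0)
        = (findEq t c).map (fun p => base + p.1) := fun t => by
      rw [hc]; exact locate_eq_findEq key base t chunk 0
    by_cases hm1 : mode = "min"
    · subst hm1
      have hA : List.foldl (candStep "min") (none, none) (c0 :: ct)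
          = o2s (some (List.foldl minStrict c0 ct)) := by
        rw [List.foldl_cons]
        have h0 : candStep "min" ((none : Option Int), (none : Option Int)) c0
            = (some c0.1, some c0.2) := rfl
        rw [h0]
        simpa using foldCand_min_eq ct c0.1 c0.2
      have htgt : (PySem.List.min? (c0.2 :: ct.map (·.2)) (fun v => v)).getD c0.2
          = List.foldl min c0.2 (ct.map (·.2)) := by
        rw [PySem.List.min?_id_cons]; rfl
      simp only [List.map_cons]
      rw [hA]
      simp only [o2s]
      rw [hloc, hcc]
      rw [if_pos (by decide : ((("min" : String) == "min") = true))]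
      rw [htgt, findEq_min ct c0]
      rfl
    · by_cases hm2 : mode = "max"
      · subst hm2
        have hA : List.foldl (candStep "max") (none, none) (c0 :: ct)
            = o2s (some (List.foldl maxStrict c0 ct)) := by
          rw [List.foldl_cons]
          have h0 : candStep "max" ((none : Option Int), (none : Option Int)) c0
              = (some c0.1, some c0.2) := rfl
          rw [h0]
          simpa using foldCand_max_eq ct c0.1 c0.2
        have htgt : (PySem.List.max? (c0.2 :: ct.map (·.2)) (fun v => v)).getD c0.2
            = List.foldl max c0.2 (ct.map (·.2)) := by
          rw [PySem.List.max?_id_cons]; rfl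
        simp only [List.map_cons]
        rw [hA]
        simp only [o2s]
        rw [hloc, hcc]
        rw [if_neg (by decide : ¬ ((("max" : String) == "min") = true))]
        rw [if_pos (by decide : ((("max" : String) == "max") = true))]
        rw [htgt, findEq_max ct c0]
        rfl
      · have h1 : (mode == "min") = false := by simp [hm1]
        have h2 : (mode == "max") = false := by simp [hm2]
        have hA : List.foldl (candStep mode) (none, none) (c0 :: ct)
            = (some c0.1, some c0.2) := by
          rw [List.foldl_cons]
          have h0 : candStep mode ((none : Option Int), (none : Option Int)) c0
              = (some c0.1, some c0.2) := rfl
          rw [h0]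
          exact foldCand_other_eq mode h1 h2 ct c0.1 c0.2
        simp only [List.map_cons]
        rw [hA]
        rw [hloc, hcc]
        rw [if_neg (by simp [h1] : ¬ ((mode == "min") = true))]
        rw [if_neg (by simp [h2] : ¬ ((mode == "max") = true))]
        have hfe : findEq c0.2 (c0 :: ct) = some c0 := by simp [findEq]
        rw [hfe]
        rfl

-- ===== VERDICT (by name: the statement is the Claim_ definition above) =====
theorem index_of_extreme_py_spec : Claim_equal_index_of_extreme_py := by
  intro bars last_n key mode _
  unfold Spec_index_of_extreme_py index_of_extreme_py index_of_extreme_py_alt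
  by_cases hg : bars.isEmpty = true ∨ last_n ≤ 0
  · rw [if_pos hg, if_pos hg]
  · rw [if_neg hg, if_neg hg]
    dsimp only
    rw [foldA_eq_foldCand]
    exact core_eq key mode _ _
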